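-- pv_equiv track=rewrite | github.com/zhang677/PCL-lite | step/ops.py | get_full_indices
-- ===== SOURCE A (Python) =====
-- from functools import reduce
--
-- def get_full_indices(shape):
--     if len(shape) == 0:
--         return [()]
--     total_elements = reduce(lambda x, y: x * y, shape)
--     indices = []
--     # For example, shape [2,3,4]
--     # Output: [(0, 0, 0), (0, 0, 1), (0, 1, 0), (0, 1, 1), (0, 2, 0), (0, 2, 1), (1, 0, 0), (1, 0, 1), (1, 1, 0), (1, 1, 1), (1, 2, 0), (1, 2, 1), (2, 0, 0), (2, 0, 1), (2, 1, 0), (2, 1, 1), (2, 2, 0), (2, 2, 1), (3, 0, 0), (3, 0, 1), (3, 1, 0), (3, 1, 1), (3, 2, 0), (3, 2, 1)]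
--     for i in range(total_elements):
--         idx = []
--         for j in range(len(shape)):
--             idx.append(i % shape[j])
--             i //= shape[j]
--         indices.append(tuple(idx[::-1]))
--     return indices
-- ===== SOURCE B (Python) =====
-- def get_full_indices(shape):
--     if any(s <= 0 for s in shape):
--         return []
--     out = [()]
--     for s in reversed(shape):
--         out = [t + (d,) for t in out for d in range(s)]
--     return out
-- ===== Notes on version B (the rewrite author's own statement) =====
-- stated objective: simpler
-- what changed: Replaced the per-linear-index mixed-radix decode (a mod/floordiv pair per digit of every index) by an incremental Cartesian product: tuples are extended dimension by dimension over the reversed shape, returning an empty list at once when some dimension is nonpositive.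
-- intended difference: On shapes containing a negative dimension whose product is still positive (an even number of negatives, no zero), A returns tuples of garbage negative digits from floor mod and floor division, while B returns an empty list, the intended answer, since a negative dimension has no valid indices. — e.g. on get_full_indices([-1, -1]): A returns [[0, 0]], B returns []
import Mathlib
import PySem

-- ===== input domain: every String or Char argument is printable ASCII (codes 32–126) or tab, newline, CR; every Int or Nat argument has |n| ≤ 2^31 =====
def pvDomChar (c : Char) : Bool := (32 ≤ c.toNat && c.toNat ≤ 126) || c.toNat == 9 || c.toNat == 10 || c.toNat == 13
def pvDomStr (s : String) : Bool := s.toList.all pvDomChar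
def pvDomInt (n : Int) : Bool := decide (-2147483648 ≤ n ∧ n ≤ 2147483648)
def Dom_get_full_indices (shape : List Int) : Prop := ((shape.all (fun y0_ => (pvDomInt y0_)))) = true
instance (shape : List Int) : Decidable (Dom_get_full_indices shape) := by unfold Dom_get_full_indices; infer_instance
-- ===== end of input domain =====

-- B enumerates the Cartesian product of ranges over the reversed shape instead of
-- decoding each linear index with mod/floordiv; same output on all valid shapes.

-- ===== PORT A =====
def get_full_indices (shape : List Int) : List (List Int) :=
  if shape.length = 0 then [[]]
  else
    let total : Int := match shape with
      | [] => 0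
      | x :: xs => xs.foldl (· * ·) x
    (PySem.List.pyRange 0 total 1).foldl (fun indices i =>
      let st := (PySem.List.pyRange 0 (shape.length : Int) 1).foldl
        (fun (p : Int × List Int) j =>
          (PySem.Int.floordiv p.1 (PySem.List.pyGetD shape j 0),
           p.2 ++ [PySem.Int.mod p.1 (PySem.List.pyGetD shape j 0)]))
        (i, ([] : List Int))
      indices ++ [st.2.reverse]) []

-- ===== PORT B =====
-- incremental Cartesian product over the reversed shape; empty early if a dimension is ≤ 0
def get_full_indices_alt (shape : List Int) : List (List Int) :=
  if shape.any (fun s => decide (s ≤ 0)) then []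
  else
    shape.reverse.foldl (fun out s =>
      out.flatMap (fun t => (PySem.List.pyRange 0 s 1).map (fun d => t ++ [d]))) [[]]

-- ===== PRECONDITION & SPEC =====
-- On shapes with a negative dimension but positive product, A returns tuples of
-- garbage negative digits from floor mod/div; B returns an empty list (no valid indices), the intended value.
def D_get_full_indices (shape : List Int) : Prop :=
  (∃ x ∈ shape, x < 0) ∧ 0 < shape.foldl (· * ·) 1
instance (shape : List Int) : Decidable (D_get_full_indices shape) := by
  unfold D_get_full_indices; infer_instance

def Spec_get_full_indices (shape : List Int) (out : List (List Int)) : Prop :=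
  ¬ D_get_full_indices shape → out = get_full_indices_alt shape
instance (shape : List Int) (out : List (List Int)) : Decidable (Spec_get_full_indices shape out) := by
  unfold Spec_get_full_indices; infer_instance

def pvDiffWitness_get_full_indices : List Int := [-1, -1]
def pvDiffWitnessOut_get_full_indices : (List (List Int)) × (List (List Int)) :=
  ([[0, 0]], [])

-- ===== CLAIM (what is proved, stated in full; the proofs are below) =====
def Claim_unchanged_get_full_indices : Prop := ∀ (shape : List Int), Dom_get_full_indices shape → Spec_get_full_indices shape (get_full_indices shape)
def Claim_changed_get_full_indices : Prop := Dom_get_full_indices (pvDiffWitness_get_full_indices) ∧ D_get_full_indices (pvDiffWitness_get_full_indices) ∧ get_full_indices (pvDiffWitness_get_full_indices) = pvDiffWitnessOut_get_full_indices.1 ∧ get_full_indices_alt (pvDiffWitness_get_full_indices) = pvDiffWitnessOut_get_full_indices.2 ∧ pvDiffWitnessOut_get_full_indices.1 ≠ pvDiffWitnessOut_get_full_indices.2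
def Claim_exact_get_full_indices : Prop := ∀ (shape : List Int), Dom_get_full_indices shape → D_get_full_indices shape → get_full_indices shape ≠ get_full_indices_alt shape

-- ===== LEMMAS AND PROOFS =====

-- the little-endian digit string A's inner loop produces, as structural recursion
def pvDigits : Int → List Int → List Int
  | _, [] => []
  | i, s :: r => PySem.Int.mod i s :: pvDigits (PySem.Int.floordiv i s) r

def pvFdAll : Int → List Int → Int
  | i, [] => i
  | i, s :: r => pvFdAll (PySem.Int.floordiv i s) r

def pvProd (xs : List Int) : Int := xs.foldl (· * ·) 1

lemma pvFoldlMul (xs : List Int) : ∀ a : Int, xs.foldl (· * ·) a = a * pvProd xs := by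
  induction xs with
  | nil => intro a; simp [pvProd]
  | cons x xs ih =>
    intro a
    rw [List.foldl_cons, ih (a * x)]
    have h2 : pvProd (x :: xs) = (1 * x) * pvProd xs := by
      rw [pvProd, List.foldl_cons, ih (1 * x)]
    rw [h2]; ring

lemma pvProd_cons (x : Int) (xs : List Int) : pvProd (x :: xs) = x * pvProd xs := by
  calc pvProd (x :: xs) = xs.foldl (· * ·) (1 * x) := rfl
    _ = (1 * x) * pvProd xs := pvFoldlMul xs (1 * x)
    _ = x * pvProd xs := by ring

lemma pvProd_nonneg (xs : List Int) (h : ∀ x ∈ xs, 0 ≤ x) : 0 ≤ pvProd xs := by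
  induction xs with
  | nil => simp [pvProd]
  | cons x xs ih =>
    have hx : 0 ≤ x := h x (by simp)
    have := ih (fun y hy => h y (by simp [hy]))
    rw [pvProd_cons]
    positivity

lemma pvInnerFold (sh : List Int) : ∀ (i : Int) (acc : List Int),
    sh.foldl (fun (p : Int × List Int) s =>
      (PySem.Int.floordiv p.1 s, p.2 ++ [PySem.Int.mod p.1 s])) (i, acc)
      = (pvFdAll i sh, acc ++ pvDigits i sh) := by
  induction sh with
  | nil => intro i acc; simp [pvFdAll, pvDigits]
  | cons s r ih => intro i acc; simp [ih, pvFdAll, pvDigits]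

-- A, on a nonempty shape, maps the decode over range(total)
lemma pvA_eq (x : Int) (xs : List Int) :
    get_full_indices (x :: xs)
      = (PySem.List.pyRange 0 (pvProd (x :: xs)) 1).map
          (fun i => (pvDigits i (x :: xs)).reverse) := by
  have htot : xs.foldl (· * ·) x = pvProd (x :: xs) := by
    rw [pvFoldlMul xs x, pvProd_cons]
  simp only [get_full_indices, htot]
  rw [if_neg (by simp)]
  rw [PySem.List.foldl_append_singleton_eq_map]
  refine List.map_congr_left (fun i _ => ?_)
  rw [PySem.List.foldl_pyRange_zero_pyGetD' (x :: xs) (0 : Int)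
        (fun (p : Int × List Int) s =>
          (PySem.Int.floordiv p.1 s, p.2 ++ [PySem.Int.mod p.1 s])) (i, [])]
  rw [pvInnerFold]
  simp

-- B's fold over reversed(shape) as structural recursion on shape
def pvCart (sh : List Int) : List (List Int) :=
  sh.foldr (fun s out =>
    out.flatMap (fun t => (PySem.List.pyRange 0 s 1).map (fun d => t ++ [d]))) [[]]

lemma pvAlt_eq_cart (sh : List Int) (h : ¬ sh.any (fun s => decide (s ≤ 0))) :
    get_full_indices_alt sh = pvCart sh := by
  unfold get_full_indices_alt pvCart
  rw [if_neg h, List.foldl_reverse]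

lemma pvAlt_nil_of_le (sh : List Int) (h : ∃ x ∈ sh, x ≤ 0) :
    get_full_indices_alt sh = [] := by
  obtain ⟨x, hx, hx0⟩ := h
  unfold get_full_indices_alt
  rw [if_pos (List.any_eq_true.2 ⟨x, hx, by simpa using hx0⟩)]

lemma pvProd_eq_zero (sh : List Int) (h : (0:Int) ∈ sh) : pvProd sh = 0 := by
  induction sh with
  | nil => cases h
  | cons x xs ih =>
    rcases List.mem_cons.1 h with h1 | h2
    · rw [pvProd_cons, ← h1, zero_mul]
    · rw [pvProd_cons, ih h2, mul_zero]

-- range(s*T) split into T blocks of length s (s ≥ 0, T a natural number)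
lemma pvRangeMul (s : Int) (hs : 0 ≤ s) : ∀ t : Nat,
    PySem.List.pyRange 0 (s * t) 1
      = (PySem.List.pyRange 0 (t : Int) 1).flatMap
          (fun q => (PySem.List.pyRange 0 s 1).map (fun d => q * s + d)) := by
  intro t
  induction t with
  | zero => simp [PySem.List.pyRange_one_eq_nil]
  | succ t ih =>
    have h1 : (0:Int) ≤ s * t := by positivity
    have h2 : s * (t:Int) ≤ s * t + s := by linarith
    push_cast
    have hsucc : PySem.List.pyRange 0 ((t:Int) + 1) 1
        = PySem.List.pyRange 0 (t : Int) 1 ++ [(t : Int)] :=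
      PySem.List.pyRange_one_succ_right (by positivity)
    have hmul : s * ((t:Int) + 1) = s * t + s := by ring
    rw [hmul, hsucc, List.flatMap_append, ← ih,
        PySem.List.pyRange_one_append 0 (s * t) (s * t + s) h1 h2]
    congr 1
    simp only [List.flatMap_cons, List.flatMap_nil, List.append_nil]
    rw [PySem.List.pyRange_one (s * t) (s * t + s), PySem.List.pyRange_one 0 s]
    have hsub : s * (t:Int) + s - s * t = s - 0 := by ring
    rw [hsub]
    simp only [List.map_map]
    refine List.map_congr_left (fun k _ => ?_)
    simp only [Function.comp]
    ring

lemma pvMod_digit (s q d : Int) (hd0 : 0 ≤ d) (hds : d < s) :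
    PySem.Int.mod (q * s + d) s = d := by
  have hs : 0 < s := lt_of_le_of_lt hd0 hds
  rw [PySem.Int.mod_eq_emod_of_pos hs]
  have : q * s + d = d + s * q := by ring
  rw [this, Int.add_mul_emod_self_left]
  exact Int.emod_eq_of_lt hd0 hds

lemma pvFd_digit (s q d : Int) (hd0 : 0 ≤ d) (hds : d < s) :
    PySem.Int.floordiv (q * s + d) s = q := by
  have hs : 0 < s := lt_of_le_of_lt hd0 hds
  rw [PySem.Int.floordiv_eq_ediv_of_pos hs]
  have : q * s + d = d + s * q := by ring
  rw [this, Int.add_mul_ediv_left _ _ (by omega : s ≠ 0)]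
  rw [Int.ediv_eq_zero_of_lt hd0 hds]
  ring

-- the main equivalence on all-nonnegative shapes
lemma pvMain (sh : List Int) (h : ∀ x ∈ sh, 0 ≤ x) :
    (PySem.List.pyRange 0 (pvProd sh) 1).map (fun i => (pvDigits i sh).reverse)
      = pvCart sh := by
  induction sh with
  | nil => decide
  | cons s rest ih =>
    have hs : 0 ≤ s := h s (by simp)
    have hrest : ∀ x ∈ rest, 0 ≤ x := fun y hy => h y (by simp [hy])
    have hP : 0 ≤ pvProd rest := pvProd_nonneg rest hrest
    have hPcons : pvProd (s :: rest) = s * pvProd rest := pvProd_cons s rest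
    have hcart : pvCart (s :: rest)
        = (pvCart rest).flatMap
            (fun t => (PySem.List.pyRange 0 s 1).map (fun d => t ++ [d])) := rfl
    have hcast : pvProd rest = ((pvProd rest).toNat : Int) := (Int.toNat_of_nonneg hP).symm
    rw [hcart, ← ih hrest, hPcons, hcast, pvRangeMul s hs]
    rw [List.flatMap_map, List.map_flatMap]
    refine List.flatMap_congr (fun q hq => ?_)
    rw [← hcast] at hq
    simp only [List.map_map]
    refine List.map_congr_left (fun d hd => ?_)
    have hd' := (PySem.List.mem_pyRange_one).1 hd
    simp only [Function.comp, pvDigits, List.reverse_cons]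
    rw [pvMod_digit s q d hd'.1 hd'.2, pvFd_digit s q d hd'.1 hd'.2]

-- ===== VERDICT (by name: the statement is the Claim_ definition above) =====
theorem get_full_indices_spec : Claim_unchanged_get_full_indices := by
  intro shape _ hnd
  cases shape with
  | nil => decide
  | cons x xs =>
    by_cases hall : ∀ y ∈ x :: xs, 0 ≤ y
    · by_cases hz : (x :: xs).any (fun s => decide (s ≤ 0))
      · obtain ⟨y, hy, hy0⟩ := List.any_eq_true.1 hz
        have hy0' : y ≤ 0 := by simpa using hy0
        have hy00 : y = 0 := le_antisymm hy0' (hall y hy)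
        rw [pvA_eq, pvAlt_nil_of_le _ ⟨y, hy, hy0'⟩,
            pvProd_eq_zero _ (hy00 ▸ hy), PySem.List.pyRange_one_eq_nil (by omega)]
        simp
      · rw [pvA_eq, pvAlt_eq_cart _ (by simpa using hz), pvMain _ hall]
    · rw [not_forall] at hall
      simp only [not_forall, exists_prop, not_le] at hall
      obtain ⟨y, hy, hyneg⟩ := hall
      have hneg : ∃ z ∈ x :: xs, z < 0 := ⟨y, hy, by omega⟩
      have hP0 : List.foldl (· * ·) 1 (x :: xs) ≤ 0 := by
        by_contra hP
        exact hnd ⟨hneg, by omega⟩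
      have hP : pvProd (x :: xs) ≤ 0 := hP0
      rw [pvA_eq, pvAlt_nil_of_le _ ⟨y, hy, by omega⟩,
          PySem.List.pyRange_one_eq_nil (by omega)]
      simp

theorem get_full_indices_changed : Claim_changed_get_full_indices := by
  unfold Claim_changed_get_full_indices; decide

theorem get_full_indices_tight : Claim_exact_get_full_indices := by
  intro shape _ hd
  obtain ⟨hneg, hP⟩ := hd
  have hP' : 0 < pvProd shape := hP
  have hne : shape ≠ [] := by
    rintro rfl
    obtain ⟨x, hx, _⟩ := hneg
    cases hx
  cases shape with
  | nil => exact absurd rfl hne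
  | cons x xs =>
    obtain ⟨y, hy, hyneg⟩ := hneg
    rw [pvA_eq, pvAlt_nil_of_le _ ⟨y, hy, by omega⟩]
    intro hcontra
    have : (PySem.List.pyRange 0 (pvProd (x :: xs)) 1).length = 0 := by
      rw [← List.length_map (f := fun i => (pvDigits i (x :: xs)).reverse), hcontra]
      rfl
    rw [PySem.List.length_pyRange_one] at this
    omega
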